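-- pv_equiv track=rewrite | github.com/skelen18/Advent-Of-Code | 2024/Day11/part1.py | evolve_stones
-- ===== SOURCE A (Python) =====
-- def split_number(number):
--     str_num = str(number)
--     mid = len(str_num) // 2
--     left = int(str_num[:mid])
--     right = int(str_num[mid:])
--     return left, right
--
-- def evolve_stones(stones, blinks):
--     for _ in range(blinks):
--         new_stones = []
--         for stone in stones:
--             if stone == 0:
--                 new_stones.append(1)
--             elif len(str(stone)) % 2 == 0:
--                 left, right = split_number(stone)
--                 new_stones.extend([left, right])
--             else:
--                 new_stones.append(stone * 2024)
--         stones = new_stones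
--     return stones
-- ===== SOURCE B (Python) =====
-- def evolve_stones(stones, blinks):
--     # Depth-first recursion per stone over the blink count (A iterates level-by-level over the whole list).
--     def evolve_one(stone, b):
--         if b <= 0:
--             return [stone]
--         if stone == 0:
--             children = [1]
--         else:
--             s = str(stone)
--             if len(s) % 2 == 0:
--                 mid = len(s) // 2
--                 children = [int(s[:mid]), int(s[mid:])]
--             else:
--                 children = [stone * 2024]
--         result = []
--         for c in children:
--             result += evolve_one(c, b - 1)
--         return result
--
--     out = []
--     for s in stones:
--         out += evolve_one(s, blinks)
--     return out
-- ===== Notes on version B (the rewrite author's own statement) =====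
-- stated objective: alternative
-- what changed: Replaces A's breadth-first blink-by-blink rebuild of the whole stone list with a per-stone depth-first recursion over the blink count, concatenating the fully evolved descendants of each stone in order.
-- outside the precondition, e.g. on evolve_stones([-123], 1): A returns [-1, 23], B returns [-1, 23]
import Mathlib
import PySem

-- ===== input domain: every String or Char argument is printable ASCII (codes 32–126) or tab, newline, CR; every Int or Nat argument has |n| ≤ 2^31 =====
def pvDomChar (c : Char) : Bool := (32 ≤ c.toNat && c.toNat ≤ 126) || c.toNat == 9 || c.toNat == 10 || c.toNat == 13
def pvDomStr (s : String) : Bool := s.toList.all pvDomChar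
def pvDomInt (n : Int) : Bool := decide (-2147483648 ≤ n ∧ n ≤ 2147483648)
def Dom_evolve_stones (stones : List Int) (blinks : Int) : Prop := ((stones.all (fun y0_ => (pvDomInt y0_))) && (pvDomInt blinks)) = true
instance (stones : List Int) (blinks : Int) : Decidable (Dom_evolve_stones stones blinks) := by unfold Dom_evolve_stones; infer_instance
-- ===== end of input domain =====

-- B evolves each stone depth-first over the blink count instead of A's level-by-level rebuild; alternative decomposition, same result.


-- ===== PORT A =====
-- int(...) is ported as (PySem.Int.ofChars? _).getD 0: Pre_ excludes the inputs where Python's int() raises.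
def split_number (number : Int) : Int × Int :=
  let str_num := PySem.Int.toChars number
  let mid : Int := PySem.Int.floordiv ((str_num.length : Nat) : Int) 2
  let left := (PySem.Int.ofChars? (PySem.List.slice str_num none (some mid))).getD 0
  let right := (PySem.Int.ofChars? (PySem.List.slice str_num (some mid) none)).getD 0
  (left, right)

def evolve_stones (stones : List Int) (blinks : Int) : List Int :=
  (PySem.List.pyRange 0 blinks 1).foldl (fun st _ =>
    st.foldl (fun new_stones stone =>
      if stone = 0 then new_stones ++ [1]
      else if PySem.Int.mod (((PySem.Int.toChars stone).length : Nat) : Int) 2 = 0 then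
        let p := split_number stone
        new_stones ++ [p.1, p.2]
      else new_stones ++ [stone * 2024]) []) stones

-- ===== PORT B =====
-- the per-stone successor list computed inside evolve_one (Source B)
def pvChildren (stone : Int) : List Int :=
  if stone = 0 then [1]
  else
    let s := PySem.Int.toChars stone
    if PySem.Int.mod ((s.length : Nat) : Int) 2 = 0 then
      let mid : Int := PySem.Int.floordiv ((s.length : Nat) : Int) 2
      [(PySem.Int.ofChars? (PySem.List.slice s none (some mid))).getD 0,
       (PySem.Int.ofChars? (PySem.List.slice s (some mid) none)).getD 0]
    else [stone * 2024]

-- evolve_one(stone, b): the guard 'b <= 0' of Source B is the fuel 0 case (fuel = b.toNat)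
def pvEvolveOne (stone : Int) : Nat → List Int
  | 0 => [stone]
  | n + 1 => (pvChildren stone).foldl (fun acc c => acc ++ pvEvolveOne c n) []

def evolve_stones_alt (stones : List Int) (blinks : Int) : List Int :=
  stones.foldl (fun acc s => acc ++ pvEvolveOne s blinks.toNat) []

-- ===== PRECONDITION & SPEC =====
-- Pre_ excludes positive-blink inputs containing a negative stone: the string split there slices the '-' sign off,
-- so Python's int() may raise ValueError after an input-dependent number of blinks (A and B alike); on negative
-- inputs where A happens to return (e.g. ([-123], 1) → [-1, 23]) B returns the same value, but that set has no closed form.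
def Pre_evolve_stones (stones : List Int) (blinks : Int) : Prop :=
  blinks ≤ 0 ∨ ∀ s ∈ stones, 0 ≤ s
instance (stones : List Int) (blinks : Int) : Decidable (Pre_evolve_stones stones blinks) := by unfold Pre_evolve_stones; infer_instance

def pvWitness_evolve_stones : List Int × Int := ([0, 12, 125], 3)

def Spec_evolve_stones (stones : List Int) (blinks : Int) (out : List Int) : Prop := out = evolve_stones_alt stones blinks
instance (stones : List Int) (blinks : Int) (out : List Int) : Decidable (Spec_evolve_stones stones blinks out) := by unfold Spec_evolve_stones; infer_instance

-- ===== CLAIM (what is proved, stated in full; the proofs are below) =====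
def Claim_equal_evolve_stones : Prop := ∀ (stones : List Int) (blinks : Int), Dom_evolve_stones stones blinks → Pre_evolve_stones stones blinks → Spec_evolve_stones stones blinks (evolve_stones stones blinks)

-- ===== LEMMAS AND PROOFS =====

-- A's inner loop body appends exactly the successor list pvChildren stone
theorem pvBody_eq (acc : List Int) (stone : Int) :
    (if stone = 0 then acc ++ [1]
     else if PySem.Int.mod (((PySem.Int.toChars stone).length : Nat) : Int) 2 = 0 then
       let p := split_number stone
       acc ++ [p.1, p.2]
     else acc ++ [stone * 2024]) = acc ++ pvChildren stone := by
  by_cases h0 : stone = 0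
  · simp [pvChildren, h0]
  · by_cases he : PySem.Int.mod (((PySem.Int.toChars stone).length : Nat) : Int) 2 = 0
    · simp only [pvChildren, split_number, if_neg h0, if_pos he]
    · simp only [pvChildren, if_neg h0, if_neg he]

-- one A-blink over the whole list is flatMap of the successor function
theorem pvStep_eq (st : List Int) :
    st.foldl (fun new_stones stone =>
      if stone = 0 then new_stones ++ [1]
      else if PySem.Int.mod (((PySem.Int.toChars stone).length : Nat) : Int) 2 = 0 then
        let p := split_number stone
        new_stones ++ [p.1, p.2]
      else new_stones ++ [stone * 2024]) [] = st.flatMap pvChildren := by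
  have h := PySem.List.foldl_append_eq_flatMap (l := st) (g := pvChildren) (acc := [])
  simp only [List.nil_append] at h
  rw [← h]
  exact PySem.List.foldl_congr_mem _ _ _ _ (fun acc a _ => pvBody_eq acc a)

-- folding a constant-step function over a list iterates it length-many times
theorem pvFoldl_iterate (g : List Int → List Int) (l : List Int) (st : List Int) :
    l.foldl (fun s _ => g s) st = g^[l.length] st := by
  induction l generalizing st with
  | nil => rfl
  | cons x xs ih => simp [List.foldl_cons, ih, Function.iterate_succ_apply]

-- depth-first per-stone evolution agrees with breadth-first iteration of the step
theorem pvMain (n : Nat) (xs : List Int) :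
    (fun st => st.flatMap pvChildren)^[n] xs = xs.flatMap (fun s => pvEvolveOne s n) := by
  induction n generalizing xs with
  | zero => simp [pvEvolveOne]
  | succ n ih =>
    rw [Function.iterate_succ_apply, ih, List.flatMap_assoc]
    refine List.flatMap_congr ?_
    intro s _
    have h := PySem.List.foldl_append_eq_flatMap (l := pvChildren s) (g := fun c => pvEvolveOne c n) (acc := [])
    simp only [List.nil_append] at h
    simp [pvEvolveOne, h]

-- ===== VERDICT (by name: the statement is the Claim_ definition above) =====
theorem evolve_stones_spec : Claim_equal_evolve_stones := by
  intro stones blinks _ _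
  unfold Spec_evolve_stones evolve_stones evolve_stones_alt
  have h := PySem.List.foldl_append_eq_flatMap (l := stones) (g := fun s => pvEvolveOne s blinks.toNat) (acc := [])
  simp only [List.nil_append] at h
  rw [h]
  have hstep : ∀ st : List Int,
      st.foldl (fun new_stones stone =>
        if stone = 0 then new_stones ++ [1]
        else if PySem.Int.mod (((PySem.Int.toChars stone).length : Nat) : Int) 2 = 0 then
          let p := split_number stone
          new_stones ++ [p.1, p.2]
        else new_stones ++ [stone * 2024]) [] = st.flatMap pvChildren := pvStep_eq
  calc (PySem.List.pyRange 0 blinks 1).foldl (fun st _ => _) stones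
      = (fun st => st.flatMap pvChildren)^[(PySem.List.pyRange 0 blinks 1).length] stones := by
        rw [← pvFoldl_iterate]
        exact PySem.List.foldl_congr_mem _ _ _ _ (fun st a _ => hstep st)
    _ = stones.flatMap (fun s => pvEvolveOne s blinks.toNat) := by
        rw [PySem.List.length_pyRange_one]
        simpa using pvMain blinks.toNat stones
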